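-- pv_equiv track=rewrite | github.com/The-Osiris-Labs/Tehuti-CLI | src/tehuti_cli/ui/shell.py | _split_shell_steps
-- ===== SOURCE A (Python) =====
-- def _split_shell_steps(command: str) -> list[str]:
--     steps: list[str] = []
--     buf = []
--     in_single = False
--     in_double = False
--     i = 0
--     while i < len(command):
--         ch = command[i]
--         if ch == "'" and not in_double:
--             in_single = not in_single
--         elif ch == '"' and not in_single:
--             in_double = not in_double
--         if not in_single and not in_double:
--             if command[i : i + 2] == "&&":
--                 part = "".join(buf).strip()
--                 if part:
--                     steps.append(part)
--                 buf = []
--                 i += 2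
--                 continue
--             if ch == ";":
--                 part = "".join(buf).strip()
--                 if part:
--                     steps.append(part)
--                 buf = []
--                 i += 1
--                 continue
--         buf.append(ch)
--         i += 1
--     final = "".join(buf).strip()
--     if final:
--         steps.append(final)
--     return steps
-- ===== SOURCE B (Python) =====
-- def _split_shell_steps(command: str) -> list[str]:
--     # Pass 1: find delimiter boundaries (index, length) outside quotes.
--     bounds = []
--     in_single = in_double = False
--     i = 0
--     n = len(command)
--     while i < n:
--         ch = command[i]
--         if ch == "'" and not in_double:
--             in_single = not in_single
--         elif ch == '"' and not in_single:
--             in_double = not in_double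
--         if not in_single and not in_double:
--             if command[i : i + 2] == "&&":
--                 bounds.append((i, 2))
--                 i += 2
--                 continue
--             if ch == ";":
--                 bounds.append((i, 1))
--                 i += 1
--                 continue
--         i += 1
--     # Pass 2: slice the segments out of the original string.
--     steps = []
--     prev = 0
--     for (k, length) in bounds:
--         seg = command[prev:k].strip()
--         if seg:
--             steps.append(seg)
--         prev = k + length
--     seg = command[prev:].strip()
--     if seg:
--         steps.append(seg)
--     return steps
-- ===== Notes on version B (the rewrite author's own statement) =====
-- stated objective: alternative
-- what changed: A accumulates each segment char-by-char in a Python-level buffer during its scan; B's scan only records the (index, length) of each top-level delimiter into a boundaries list and a second pass slices the segments out of the original string.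
import Mathlib
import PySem

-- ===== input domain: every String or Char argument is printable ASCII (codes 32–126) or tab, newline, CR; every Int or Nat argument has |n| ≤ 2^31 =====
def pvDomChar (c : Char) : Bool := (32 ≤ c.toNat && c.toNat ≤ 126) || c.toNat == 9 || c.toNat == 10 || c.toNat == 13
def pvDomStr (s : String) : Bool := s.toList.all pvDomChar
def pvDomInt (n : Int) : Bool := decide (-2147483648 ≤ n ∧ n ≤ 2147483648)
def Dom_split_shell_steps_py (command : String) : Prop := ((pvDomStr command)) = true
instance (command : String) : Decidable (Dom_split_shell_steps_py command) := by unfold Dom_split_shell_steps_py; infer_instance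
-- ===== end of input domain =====

-- B replaces A's char-by-char segment buffer with a boundary-finding scan plus a separate slicing pass (alternative decomposition, same cost).

-- ===== PORT A =====
-- A's while-loop over indices, as structural recursion consuming the remaining chars
-- (i += 2 on "&&" consumes two chars: rest.tail). command[i:i+2] == "&&" is
-- ch == '&' and the next char is '&'. "".join(buf).strip() is Chars.strip buf;
-- `if part:` on a str is the non-emptiness test.
def splitA_loop : List Char → List String → List Char → Bool → Bool → List String
  | [], steps, buf, _, _ =>
      let fin := PySem.Chars.strip buf
      if fin ≠ [] then steps ++ [String.ofList fin] else steps
  | ch :: rest, steps, buf, s, d =>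
      let s' := if ch == '\'' && !d then !s else s
      let d' := if ch == '\'' && !d then d else if ch == '"' && !s then !d else d
      if !s' && !d' then
        if ch == '&' && rest.head? == some '&' then
          let part := PySem.Chars.strip buf
          let steps' := if part ≠ [] then steps ++ [String.ofList part] else steps
          splitA_loop rest.tail steps' [] s' d'
        else if ch == ';' then
          let part := PySem.Chars.strip buf
          let steps' := if part ≠ [] then steps ++ [String.ofList part] else steps
          splitA_loop rest steps' [] s' d'
        else splitA_loop rest steps (buf ++ [ch]) s' d'
      else splitA_loop rest steps (buf ++ [ch]) s' d'
  termination_by cs _ _ _ _ => cs.length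
  decreasing_by
    · simp [List.length_tail]
    · simp
    · simp
    · simp

def split_shell_steps_py (command : String) : List String :=
  splitA_loop command.toList [] [] false false

-- ===== PORT B =====
-- Pass 1 of Source B: collect (index, length) of every top-level delimiter.
def splitB_scan : List Char → Nat → Bool → Bool → List (Nat × Nat)
  | [], _, _, _ => []
  | ch :: rest, i, s, d =>
      let s' := if ch == '\'' && !d then !s else s
      let d' := if ch == '\'' && !d then d else if ch == '"' && !s then !d else d
      if !s' && !d' then
        if ch == '&' && rest.head? == some '&' then
          (i, 2) :: splitB_scan rest.tail (i + 2) s' d'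
        else if ch == ';' then
          (i, 1) :: splitB_scan rest (i + 1) s' d'
        else splitB_scan rest (i + 1) s' d'
      else splitB_scan rest (i + 1) s' d'
  termination_by cs _ _ _ => cs.length
  decreasing_by
    · simp [List.length_tail]
    · simp
    · simp
    · simp

-- Pass 2 of Source B: slice command[prev:k] for each boundary, then command[prev:].
-- (command[prev:k] with 0 ≤ prev ≤ k is (drop prev).take (k - prev), PySem.List.slice_natCast.)
def splitB_assemble (cs : List Char) : List (Nat × Nat) → Nat → List String → List String
  | [], prev, steps =>
      let seg := PySem.Chars.strip (cs.drop prev)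
      if seg ≠ [] then steps ++ [String.ofList seg] else steps
  | (k, len) :: more, prev, steps =>
      let seg := PySem.Chars.strip ((cs.drop prev).take (k - prev))
      let steps' := if seg ≠ [] then steps ++ [String.ofList seg] else steps
      splitB_assemble cs more (k + len) steps'

def split_shell_steps_py_alt (command : String) : List String :=
  splitB_assemble command.toList (splitB_scan command.toList 0 false false) 0 []

-- ===== PRECONDITION & SPEC =====
def Spec_split_shell_steps_py (command : String) (out : List String) : Prop := out = split_shell_steps_py_alt command
instance (command : String) (out : List String) : Decidable (Spec_split_shell_steps_py command out) := by unfold Spec_split_shell_steps_py; infer_instance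

-- ===== CLAIM (what is proved, stated in full; the proofs are below) =====
def Claim_equal_split_shell_steps_py : Prop := ∀ (command : String), Dom_split_shell_steps_py command → Spec_split_shell_steps_py command (split_shell_steps_py command)

-- ===== LEMMAS AND PROOFS =====

theorem splitA_loop_acc_n (n : Nat) : ∀ (cs : List Char), cs.length ≤ n → ∀ (steps : List String) (buf : List Char) (s d : Bool),
    splitA_loop cs steps buf s d = steps ++ splitA_loop cs [] buf s d := by
  induction n with
  | zero =>
    intro cs hcs steps buf s d
    have : cs = [] := List.eq_nil_of_length_eq_zero (by omega)
    subst this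
    simp only [splitA_loop]
    split <;> simp
  | succ n ih =>
    intro cs hcs steps buf s d
    match cs with
    | [] => simp only [splitA_loop]; split <;> simp
    | ch :: rest =>
      have ih1 : ∀ (a : List String) (b : List Char) (s d : Bool),
          splitA_loop rest a b s d = a ++ splitA_loop rest [] b s d :=
        fun a b s d => ih rest (by simp at hcs; omega) a b s d
      have ih2 : ∀ (a : List String) (b : List Char) (s d : Bool),
          splitA_loop rest.tail a b s d = a ++ splitA_loop rest.tail [] b s d :=
        fun a b s d => ih rest.tail (by simp [List.length_tail] at *; omega) a b s d
      simp only [splitA_loop]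
      split_ifs <;>
        (try simp only [List.nil_append]) <;>
        (first
          | (rw [ih2] <;> rw [ih2] <;> rw [ih2] <;> simp)
          | (rw [ih2] <;> rw [ih2] <;> simp)
          | (rw [ih2] <;> simp)
          | rw [ih2]
          | (rw [ih1] <;> rw [ih1] <;> rw [ih1] <;> simp)
          | (rw [ih1] <;> rw [ih1] <;> simp)
          | (rw [ih1] <;> simp)
          | rw [ih1])
      all_goals
        first
        | exact (ih2 [String.ofList (PySem.Chars.strip buf)] [] _ _).symm
        | exact (ih1 [String.ofList (PySem.Chars.strip buf)] [] _ _).symm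

theorem splitA_loop_acc (cs : List Char) (steps : List String) (buf : List Char) (s d : Bool) :
    splitA_loop cs steps buf s d = steps ++ splitA_loop cs [] buf s d :=
  splitA_loop_acc_n cs.length cs le_rfl steps buf s d

theorem take_extend (full : List Char) (prev i : Nat) (ch : Char) (rest : List Char)
    (hdrop : full.drop i = ch :: rest) (hle : prev ≤ i) :
    (full.drop prev).take (i + 1 - prev) = (full.drop prev).take (i - prev) ++ [ch] := by
  have hch : (full.drop prev)[i - prev]? = some ch := by
    rw [List.getElem?_drop]
    have : prev + (i - prev) = i := by omega
    rw [this]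
    have h0 : (full.drop i)[0]? = some ch := by rw [hdrop]; rfl
    rw [List.getElem?_drop] at h0
    simpa using h0
  have : i + 1 - prev = (i - prev) + 1 := by omega
  rw [this, List.take_succ, hch]
  rfl

theorem drop_succ_of_drop (full : List Char) (i : Nat) (ch : Char) (rest : List Char)
    (hdrop : full.drop i = ch :: rest) : full.drop (i + 1) = rest := by
  rw [List.drop_add_one_eq_tail_drop, hdrop]
  rfl

theorem scan_assemble (full : List Char) (cs : List Char) (i : Nat) (s d : Bool) :
    ∀ (prev : Nat) (steps : List String),
    full.drop i = cs → prev ≤ i →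
    splitB_assemble full (splitB_scan cs i s d) prev steps
      = steps ++ splitA_loop cs [] ((full.drop prev).take (i - prev)) s d := by
  fun_induction splitB_scan cs i s d with
  | case1 i s d =>
    intro prev steps hdrop hle
    have hlen : full.length ≤ i := by
      have := congrArg List.length hdrop
      simp at this; omega
    have htake : (full.drop prev).take (i - prev) = full.drop prev := by
      apply List.take_of_length_le
      simp; omega
    simp only [splitB_assemble, splitA_loop, htake]
    split <;> simp
  | case2 ch rest i s d s' d' htop hdelim ih =>
    intro prev steps hdrop hle
    have hdrop1 := drop_succ_of_drop full i ch rest hdrop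
    have hdrop2 : full.drop (i + 2) = rest.tail := by
      rw [show i + 2 = (i + 1) + 1 by ring, List.drop_add_one_eq_tail_drop, hdrop1]
    simp only [splitB_assemble]
    rw [ih (i + 2) _ hdrop2 (by omega)]
    simp only [Nat.sub_self, List.take_zero, splitA_loop]
    rw [show (if (ch == '\'' && !d) = true then !s else s) = s' from rfl,
        show (if (ch == '\'' && !d) = true then d else if (ch == '"' && !s) = true then !d else d) = d' from rfl,
        if_pos htop, if_pos hdelim, splitA_loop_acc rest.tail]
    split <;> simp <;> exact (splitA_loop_acc rest.tail [String.ofList (PySem.Chars.strip (List.take (i - prev) (List.drop prev full)))] [] s' d').symm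
  | case3 ch rest i s d s' d' htop hno hdelim ih =>
    intro prev steps hdrop hle
    have hdrop1 := drop_succ_of_drop full i ch rest hdrop
    simp only [splitB_assemble]
    rw [ih (i + 1) _ hdrop1 (by omega)]
    simp only [Nat.sub_self, List.take_zero, splitA_loop]
    rw [show (if (ch == '\'' && !d) = true then !s else s) = s' from rfl,
        show (if (ch == '\'' && !d) = true then d else if (ch == '"' && !s) = true then !d else d) = d' from rfl,
        if_pos htop, if_neg hno, if_pos hdelim, splitA_loop_acc rest]
    split <;> simp <;> exact (splitA_loop_acc rest [String.ofList (PySem.Chars.strip (List.take (i - prev) (List.drop prev full)))] [] s' d').symm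
  | case4 ch rest i s d s' d' htop hno1 hno2 ih =>
    intro prev steps hdrop hle
    have hdrop1 := drop_succ_of_drop full i ch rest hdrop
    rw [ih prev _ hdrop1 (by omega)]
    rw [show i + 1 - prev = (i - prev) + 1 by omega,
        show (i - prev) + 1 = i + 1 - prev by omega,
        take_extend full prev i ch rest hdrop hle]
    simp only [splitA_loop]
    rw [show (if (ch == '\'' && !d) = true then !s else s) = s' from rfl,
        show (if (ch == '\'' && !d) = true then d else if (ch == '"' && !s) = true then !d else d) = d' from rfl,
        if_pos htop, if_neg hno1, if_neg hno2]
  | case5 ch rest i s d s' d' htop ih =>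
    intro prev steps hdrop hle
    have hdrop1 := drop_succ_of_drop full i ch rest hdrop
    rw [ih prev _ hdrop1 (by omega)]
    rw [show i + 1 - prev = (i - prev) + 1 by omega,
        show (i - prev) + 1 = i + 1 - prev by omega,
        take_extend full prev i ch rest hdrop hle]
    simp only [splitA_loop]
    rw [show (if (ch == '\'' && !d) = true then !s else s) = s' from rfl,
        show (if (ch == '\'' && !d) = true then d else if (ch == '"' && !s) = true then !d else d) = d' from rfl,
        if_neg htop]

-- ===== VERDICT (by name: the statement is the Claim_ definition above) =====
theorem split_shell_steps_py_spec : Claim_equal_split_shell_steps_py := by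
  intro command _
  unfold Spec_split_shell_steps_py split_shell_steps_py split_shell_steps_py_alt
  have h := scan_assemble command.toList command.toList 0 false false 0 []
    (by simp) (le_refl 0)
  simp at h
  exact h.symm
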